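-- pv_equiv track=rewrite | github.com/ysmnikhil/python-algorithms | problems/ant-in-circle.py | position_at_time
-- ===== SOURCE A (Python) =====
-- def position_at_time(circumference, positions, directions, speed, time):
--     pos = []
--
--     for i in range(len(positions)):
--         position = positions[i]
--         direction = directions[i]
--
--         for i in range(time):
--             s = direction * speed
--             position += s
--
--             if (position in positions):
--                 position -= s
--
--         pos.append(position)
--     return pos
-- ===== SOURCE B (Python) =====
-- def position_at_time(circumference, positions, directions, speed, time):
--     # Closed form per ant: the ant moves by s = direction*speed each step until the
--     # next cell it would enter is an original position; it then stays there forever.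
--     res = []
--     for p0, d in zip(positions, directions):
--         s = d * speed
--         if s == 0 or time <= 0:
--             res.append(p0)
--             continue
--         j = None  # smallest step count k >= 1 with p0 + k*s an original position
--         for q in positions:
--             diff = q - p0
--             if diff % s == 0:
--                 k = diff // s
--                 if k >= 1 and (j is None or k < j):
--                     j = k
--         moves = time if j is None else min(j - 1, time)
--         res.append(p0 + moves * s)
--     return res
-- ===== Notes on version B (the rewrite author's own statement) =====
-- stated objective: faster
-- what changed: Replaces the per-ant simulation of `time` single steps (each with a membership scan) by a closed form: one scan over the original positions finds the smallest blocking multiple j of the per-step displacement, and the final position is p0 + min(j-1, time)*s (or p0 + time*s with no blocker, p0 when s==0).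
import Mathlib
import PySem

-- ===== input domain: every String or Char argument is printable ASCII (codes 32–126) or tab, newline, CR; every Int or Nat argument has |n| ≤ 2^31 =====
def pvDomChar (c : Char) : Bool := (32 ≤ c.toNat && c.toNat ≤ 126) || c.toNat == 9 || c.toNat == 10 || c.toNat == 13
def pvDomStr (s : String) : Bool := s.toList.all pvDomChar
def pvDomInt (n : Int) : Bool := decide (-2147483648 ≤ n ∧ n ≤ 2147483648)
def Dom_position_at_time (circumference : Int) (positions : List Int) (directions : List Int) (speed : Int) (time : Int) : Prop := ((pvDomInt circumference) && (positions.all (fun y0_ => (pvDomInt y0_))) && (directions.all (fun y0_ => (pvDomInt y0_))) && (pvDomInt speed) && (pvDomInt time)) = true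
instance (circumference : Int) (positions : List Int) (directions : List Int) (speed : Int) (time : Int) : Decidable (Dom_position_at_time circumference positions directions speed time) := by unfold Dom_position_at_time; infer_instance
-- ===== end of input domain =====

-- B replaces A's step-by-step simulation (time iterations per ant) by a closed form
-- from the smallest blocking multiple of the per-step displacement, independent of time.

-- ===== PORT A =====
-- pyGetD with default 0 is exact under Pre_ (index in range); Python raises IndexError outside it.
def position_at_time (circumference : Int) (positions : List Int) (directions : List Int) (speed : Int) (time : Int) : List Int :=
  (PySem.List.pyRange 0 positions.length 1).foldl (fun pos i =>
    let position := PySem.List.pyGetD positions i 0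
    let direction := PySem.List.pyGetD directions i 0
    let position := (PySem.List.pyRange 0 time 1).foldl (fun position _ =>
      let s := direction * speed
      let position := position + s
      if position ∈ positions then position - s else position) position
    pos ++ [position]) []

-- ===== PORT B =====
-- Source B's inner scan for the smallest step index j >= 1 with p0 + j*s an original position
def pvBlocker (positions : List Int) (p0 : Int) (s : Int) : Option Int :=
  positions.foldl (fun j q =>
    if PySem.Int.mod (q - p0) s = 0 then
      -- "k >= 1 and (j is None or k < j)"; `j is None or k < j` is `k < j.getD (k+1)`
      if 1 ≤ PySem.Int.floordiv (q - p0) s ∧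
         PySem.Int.floordiv (q - p0) s < j.getD (PySem.Int.floordiv (q - p0) s + 1) then
        some (PySem.Int.floordiv (q - p0) s)
      else j
    else j) none

def position_at_time_alt (circumference : Int) (positions : List Int) (directions : List Int) (speed : Int) (time : Int) : List Int :=
  (positions.zip directions).map (fun pd =>
    let p0 := pd.1
    let s := pd.2 * speed
    if s = 0 ∨ time ≤ 0 then p0
    else
      match pvBlocker positions p0 s with
      | none => p0 + time * s
      | some j => p0 + (min (j - 1) time) * s)

-- ===== PRECONDITION & SPEC =====
-- Pre_ excludes exactly the inputs where A raises IndexError: directions shorter than positions.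
def Pre_position_at_time (circumference : Int) (positions : List Int) (directions : List Int) (speed : Int) (time : Int) : Prop :=
  positions.length ≤ directions.length
instance (circumference : Int) (positions : List Int) (directions : List Int) (speed : Int) (time : Int) : Decidable (Pre_position_at_time circumference positions directions speed time) := by unfold Pre_position_at_time; infer_instance

def pvWitness_position_at_time : Int × List Int × List Int × Int × Int := (10, [0, 3], [1, 1], 1, 5)

def Spec_position_at_time (circumference : Int) (positions : List Int) (directions : List Int) (speed : Int) (time : Int) (out : List Int) : Prop := out = position_at_time_alt circumference positions directions speed time
instance (circumference : Int) (positions : List Int) (directions : List Int) (speed : Int) (time : Int) (out : List Int) : Decidable (Spec_position_at_time circumference positions directions speed time out) := by unfold Spec_position_at_time; infer_instance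

-- ===== CLAIM (what is proved, stated in full; the proofs are below) =====
def Claim_equal_position_at_time : Prop := ∀ (circumference : Int) (positions : List Int) (directions : List Int) (speed : Int) (time : Int), Dom_position_at_time circumference positions directions speed time → Pre_position_at_time circumference positions directions speed time → Spec_position_at_time circumference positions directions speed time (position_at_time circumference positions directions speed time)

-- ===== LEMMAS AND PROOFS =====

-- A's inner-loop step for one ant with per-step displacement s
def antStep (positions : List Int) (s : Int) (p : Int) : Int :=
  if p + s ∈ positions then p else p + s

-- "k is a valid blocking step index witnessed by the original position q"
def goodK (p0 s q k : Int) : Prop := 1 ≤ k ∧ q = p0 + k * s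

-- the body of pvBlocker's fold, named for the proofs (defeq to the inline lambda)
def blkStep (p0 s : Int) (j : Option Int) (q : Int) : Option Int :=
  if PySem.Int.mod (q - p0) s = 0 then
    if 1 ≤ PySem.Int.floordiv (q - p0) s ∧
       PySem.Int.floordiv (q - p0) s < j.getD (PySem.Int.floordiv (q - p0) s + 1) then
      some (PySem.Int.floordiv (q - p0) s)
    else j
  else j

lemma pvBlocker_eq (positions : List Int) (p0 s : Int) :
    pvBlocker positions p0 s = positions.foldl (blkStep p0 s) none := rfl

lemma foldl_const_iterate {α β : Type} (f : α → α) (l : List β) (init : α) :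
    l.foldl (fun a _ => f a) init = f^[l.length] init := by
  induction l generalizing init with
  | nil => rfl
  | cons x xs ih => simp [List.foldl, ih, Function.iterate_succ_apply]

lemma goodK_unique {p0 s q k k' : Int} (hs : s ≠ 0) (h : goodK p0 s q k) (h' : goodK p0 s q k') : k = k' := by
  rcases h with ⟨_, h⟩; rcases h' with ⟨_, h'⟩
  have : k * s = k' * s := by omega
  exact mul_right_cancel₀ hs this

lemma floordiv_of_dvd {a s : Int} (hs : s ≠ 0) (h : s ∣ a) : PySem.Int.floordiv a s * s = a := by
  have hmod : PySem.Int.mod a s = 0 := (PySem.Int.mod_eq_zero_iff_dvd a s).2 h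
  have := PySem.Int.floordiv_mul_add_mod a s
  omega

lemma goodK_of_cond {p0 s q : Int} (hs : s ≠ 0) (hmod : PySem.Int.mod (q - p0) s = 0)
    (hk : 1 ≤ PySem.Int.floordiv (q - p0) s) : goodK p0 s q (PySem.Int.floordiv (q - p0) s) := by
  refine ⟨hk, ?_⟩
  have hd : s ∣ (q - p0) := (PySem.Int.mod_eq_zero_iff_dvd _ _).1 hmod
  have := floordiv_of_dvd hs hd
  linarith

lemma cond_of_goodK {p0 s q k : Int} (hs : s ≠ 0) (h : goodK p0 s q k) :
    PySem.Int.mod (q - p0) s = 0 ∧ PySem.Int.floordiv (q - p0) s = k := by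
  rcases h with ⟨hk, hq⟩
  have hd : s ∣ (q - p0) := ⟨k, by rw [hq]; ring⟩
  have hmod : PySem.Int.mod (q - p0) s = 0 := (PySem.Int.mod_eq_zero_iff_dvd _ _).2 hd
  have hfd := floordiv_of_dvd hs hd
  refine ⟨hmod, mul_right_cancel₀ hs ?_⟩
  linarith

lemma blkStep_none {p0 s : Int} (hs : s ≠ 0) {j : Option Int} {q : Int}
    (h : blkStep p0 s j q = none) : j = none ∧ ∀ k, ¬ goodK p0 s q k := by
  unfold blkStep at h
  split_ifs at h with h1 h2
  · refine ⟨h, ?_⟩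
    intro k hk
    rcases cond_of_goodK hs hk with ⟨_, hfd⟩
    rcases hk with ⟨hk1, _⟩
    rw [h] at h2
    simp only [Option.getD_none] at h2
    omega
  · refine ⟨h, ?_⟩
    intro k hk
    exact h1 (cond_of_goodK hs hk).1

lemma blkStep_some {p0 s : Int} (hs : s ≠ 0) {j : Option Int} {q r : Int}
    (h : blkStep p0 s j q = some r) :
    (j = some r ∨ goodK p0 s q r) ∧ (∀ jv, j = some jv → r ≤ jv) ∧ (∀ k, goodK p0 s q k → r ≤ k) := by
  unfold blkStep at h
  split_ifs at h with h1 h2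
  · injection h with e
    have hgood : goodK p0 s q r := e ▸ goodK_of_cond hs h1 h2.1
    have huniq : ∀ k, goodK p0 s q k → k = r := fun k hk => goodK_unique hs hk hgood
    refine ⟨Or.inr hgood, ?_, ?_⟩
    · intro jv hjv
      rcases h2 with ⟨_, hlt⟩
      rw [hjv] at hlt
      simp only [Option.getD_some] at hlt
      omega
    · intro k hk
      have := huniq k hk
      omega
  · refine ⟨Or.inl h, ?_, ?_⟩
    · intro jv hjv; rw [h] at hjv; injection hjv with e; omega
    · intro k hk
      rcases cond_of_goodK hs hk with ⟨_, hfd⟩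
      rcases hk with ⟨hk1, _⟩
      rw [h] at h2
      simp [Option.getD_some] at h2
      have := h2 (by omega)
      omega
  · refine ⟨Or.inl h, ?_, ?_⟩
    · intro jv hjv; rw [h] at hjv; injection hjv with e; omega
    · intro k hk; exact absurd (cond_of_goodK hs hk).1 h1

lemma blkStep_mono {p0 s : Int} {j : Option Int} {q jv : Int} (h : j = some jv) :
    ∃ jv', blkStep p0 s j q = some jv' ∧ jv' ≤ jv := by
  subst h
  unfold blkStep
  simp only [Option.getD_some]
  split_ifs with h1 h2
  · exact ⟨_, rfl, by omega⟩
  · exact ⟨jv, rfl, le_refl _⟩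
  · exact ⟨jv, rfl, le_refl _⟩

lemma blkStep_catch {p0 s : Int} (hs : s ≠ 0) {j : Option Int} {q k : Int} (h : goodK p0 s q k) :
    ∃ jv', blkStep p0 s j q = some jv' ∧ jv' ≤ k := by
  rcases cond_of_goodK hs h with ⟨hmod, hfd⟩
  rcases h with ⟨hk1, _⟩
  unfold blkStep
  rw [hfd, hmod, if_pos rfl]
  cases j with
  | none =>
    simp only [Option.getD_none]
    rw [if_pos ⟨hk1, by omega⟩]
    exact ⟨k, rfl, le_refl _⟩
  | some jv =>
    simp only [Option.getD_some]
    by_cases h3 : k < jv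
    · rw [if_pos ⟨hk1, h3⟩]
      exact ⟨k, rfl, le_refl _⟩
    · rw [if_neg (by intro hc; exact h3 hc.2)]
      exact ⟨jv, rfl, by omega⟩

lemma blk_go_none {p0 s : Int} (hs : s ≠ 0) :
    ∀ (l : List Int) (j : Option Int), l.foldl (blkStep p0 s) j = none →
      j = none ∧ ∀ q ∈ l, ∀ k, ¬ goodK p0 s q k := by
  intro l
  induction l with
  | nil => intro j h; simpa using h
  | cons q l ih =>
    intro j h
    rcases ih (blkStep p0 s j q) h with ⟨hstep, hl⟩
    rcases blkStep_none hs hstep with ⟨hj, hq⟩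
    refine ⟨hj, ?_⟩
    intro q' hq' k
    rcases List.mem_cons.1 hq' with rfl | hmem
    · exact hq k
    · exact hl q' hmem k

lemma blk_go_some {p0 s : Int} (hs : s ≠ 0) :
    ∀ (l : List Int) (j : Option Int) (r : Int), l.foldl (blkStep p0 s) j = some r →
      (j = some r ∨ ∃ q ∈ l, goodK p0 s q r) ∧ (∀ jv, j = some jv → r ≤ jv) ∧
      (∀ q ∈ l, ∀ k, goodK p0 s q k → r ≤ k) := by
  intro l
  induction l with
  | nil =>
    intro j r h
    simp only [List.foldl_nil] at h
    refine ⟨Or.inl h, ?_, ?_⟩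
    · intro jv hjv; rw [h] at hjv; injection hjv with e; omega
    · intro q hq k hk; simp at hq
  | cons q l ih =>
    intro j r h
    rcases ih (blkStep p0 s j q) r h with ⟨h1, h2, h3⟩
    refine ⟨?_, ?_, ?_⟩
    · rcases h1 with hstep | ⟨q', hq', hg⟩
      · rcases blkStep_some hs hstep with ⟨hc, _, _⟩
        rcases hc with hj | hg
        · exact Or.inl hj
        · exact Or.inr ⟨q, List.mem_cons_self, hg⟩
      · exact Or.inr ⟨q', List.mem_cons_of_mem _ hq', hg⟩
    · intro jv hjv
      rcases blkStep_mono (p0 := p0) (s := s) (q := q) hjv with ⟨jv', hstep, hle⟩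
      exact le_trans (h2 jv' hstep) hle
    · intro q' hq' k hk
      rcases List.mem_cons.1 hq' with rfl | hmem
      · rcases blkStep_catch hs (j := j) hk with ⟨jv'', hstep'', hle''⟩
        exact le_trans (h2 jv'' hstep'') hle''
      · exact h3 q' hmem k hk

lemma pvBlocker_none {positions : List Int} {p0 s : Int} (hs : s ≠ 0)
    (h : pvBlocker positions p0 s = none) :
    ∀ k, 1 ≤ k → p0 + k * s ∉ positions := by
  intro k hk hmem
  rcases blk_go_none hs positions none (by rw [← pvBlocker_eq]; exact h) with ⟨_, hall⟩
  exact hall _ hmem k ⟨hk, rfl⟩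

lemma pvBlocker_some {positions : List Int} {p0 s j : Int} (hs : s ≠ 0)
    (h : pvBlocker positions p0 s = some j) :
    (1 ≤ j ∧ p0 + j * s ∈ positions) ∧ ∀ k, 1 ≤ k → p0 + k * s ∈ positions → j ≤ k := by
  rcases blk_go_some hs positions none j (by rw [← pvBlocker_eq]; exact h) with ⟨h1, _, h3⟩
  rcases h1 with hnone | ⟨q, hq, hg⟩
  · exact absurd hnone (by simp)
  · rcases hg with ⟨hj1, hq'⟩
    exact ⟨⟨hj1, hq' ▸ hq⟩, fun k hk hmem => h3 _ hmem k ⟨hk, rfl⟩⟩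

-- the iterate characterisation of A's inner loop
lemma iterate_no_blocker {positions : List Int} {p0 s : Int}
    (hno : ∀ k, 1 ≤ k → p0 + k * s ∉ positions) :
    ∀ n : ℕ, (antStep positions s)^[n] p0 = p0 + (n : Int) * s := by
  intro n
  induction n with
  | zero => simp
  | succ n ih =>
    rw [Function.iterate_succ_apply', ih]
    unfold antStep
    have hnot : p0 + (n : Int) * s + s ∉ positions := by
      have := hno ((n : Int) + 1) (by omega)
      intro hmem; apply this
      have heq : p0 + ((n : Int) + 1) * s = p0 + (n : Int) * s + s := by ring
      rw [heq]; exact hmem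
    rw [if_neg hnot]
    push_cast
    ring

lemma iterate_blocker {positions : List Int} {p0 s j : Int}
    (hj1 : 1 ≤ j) (hjmem : p0 + j * s ∈ positions)
    (hjmin : ∀ k, 1 ≤ k → p0 + k * s ∈ positions → j ≤ k) :
    ∀ n : ℕ, (antStep positions s)^[n] p0 = p0 + (min (n : Int) (j - 1)) * s := by
  intro n
  induction n with
  | zero =>
    have hm : min ((0 : ℕ) : Int) (j - 1) = 0 := by push_cast; omega
    rw [Function.iterate_zero_apply, hm]
    ring
  | succ n ih =>
    rw [Function.iterate_succ_apply', ih]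
    unfold antStep
    by_cases hc : (n : Int) ≥ j - 1
    · have hm : min (n : Int) (j - 1) = j - 1 := by omega
      have hm' : min (((n + 1 : ℕ) : Int)) (j - 1) = j - 1 := by push_cast; omega
      rw [hm]
      have heq : p0 + (j - 1) * s + s = p0 + j * s := by ring
      rw [heq, if_pos hjmem, hm']
    · have hm : min (n : Int) (j - 1) = (n : Int) := by omega
      have hm' : min (((n + 1 : ℕ) : Int)) (j - 1) = (n : Int) + 1 := by push_cast; omega
      rw [hm]
      have hnot : p0 + (n : Int) * s + s ∉ positions := by
        intro hmem
        have heq : p0 + (n : Int) * s + s = p0 + ((n : Int) + 1) * s := by ring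
        rw [heq] at hmem
        have := hjmin ((n : Int) + 1) (by omega) hmem
        omega
      rw [if_neg hnot, hm']
      ring

-- A's inner loop is the iterate of antStep
lemma innerA_eq_iterate (positions : List Int) (d speed time p0 : Int) :
    (PySem.List.pyRange 0 time 1).foldl (fun position _ =>
      let s := d * speed
      let position := position + s
      if position ∈ positions then position - s else position) p0
    = (antStep positions (d * speed))^[time.toNat] p0 := by
  have hbody : (fun (position : Int) (_ : Int) =>
      let s := d * speed
      let position := position + s
      if position ∈ positions then position - s else position)
      = fun position _ => antStep positions (d * speed) position := by
    funext p x
    simp only [antStep]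
    split_ifs with h
    · omega
    · rfl
  rw [hbody, foldl_const_iterate]
  congr 1
  rw [PySem.List.pyRange_one]
  simp

-- the per-ant closed form: A's inner loop equals B's per-ant value
lemma ant_closed_form (positions : List Int) (speed time p0 d : Int) :
    (antStep positions (d * speed))^[time.toNat] p0 =
    (if d * speed = 0 ∨ time ≤ 0 then p0
     else match pvBlocker positions p0 (d * speed) with
       | none => p0 + time * (d * speed)
       | some j => p0 + (min (j - 1) time) * (d * speed)) := by
  set s := d * speed with hs
  by_cases hz : s = 0
  · rw [if_pos (Or.inl hz)]
    have hfix : antStep positions s p0 = p0 := by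
      unfold antStep; rw [hz]; split_ifs <;> omega
    exact Function.iterate_fixed hfix _
  · by_cases ht : time ≤ 0
    · rw [if_pos (Or.inr ht)]
      have h0 : time.toNat = 0 := by omega
      simp [h0]
    · rw [if_neg (by push_neg; exact ⟨hz, by omega⟩)]
      have htc : ((time.toNat : Int)) = time := by omega
      cases hb : pvBlocker positions p0 s with
      | none =>
        rw [iterate_no_blocker (pvBlocker_none hz hb), htc]
      | some j =>
        rcases pvBlocker_some hz hb with ⟨⟨hj1, hjmem⟩, hjmin⟩
        rw [iterate_blocker hj1 hjmem hjmin, htc, min_comm]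

-- port A, rewritten as a map of iterates
lemma portA_char (circumference : Int) (positions directions : List Int) (speed time : Int) :
    position_at_time circumference positions directions speed time
    = (PySem.List.pyRange 0 positions.length 1).map (fun i =>
        (antStep positions (PySem.List.pyGetD directions i 0 * speed))^[time.toNat]
          (PySem.List.pyGetD positions i 0)) := by
  unfold position_at_time
  rw [PySem.List.foldl_append_singleton_eq_map]
  simp only [List.nil_append]
  refine List.map_congr_left fun i _ => ?_
  exact innerA_eq_iterate positions (PySem.List.pyGetD directions i 0) speed time
    (PySem.List.pyGetD positions i 0)

-- ===== VERDICT (by name: the statement is the Claim_ definition above) =====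
theorem position_at_time_spec : Claim_equal_position_at_time := by
  intro circumference positions directions speed time _ hpre
  unfold Spec_position_at_time position_at_time_alt
  rw [portA_char, PySem.List.pyRange_one]
  simp only [sub_zero, Int.toNat_natCast, zero_add, List.map_map]
  apply List.ext_getElem
  · unfold Pre_position_at_time at hpre
    simp
    omega
  · intro k hk1 hk2
    have hklt : k < positions.length := by simpa using hk1
    have hkd : k < directions.length := by
      unfold Pre_position_at_time at hpre; omega
    simp only [List.getElem_map, List.getElem_range, Function.comp_apply, List.getElem_zip]
    rw [PySem.List.pyGetD_natCast, PySem.List.pyGetD_natCast]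
    rw [List.getD_eq_getElem _ _ hklt, List.getD_eq_getElem _ _ hkd]
    exact ant_closed_form positions speed time positions[k] directions[k]
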